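-- pv_equiv track=rewrite | github.com/MJJ919/My-Leetcode-Records | 1894. Find the Student that Will Replace the Chalk.py | chalkReplacer
-- ===== SOURCE A (Python) =====
-- from typing import List
--
-- def chalkReplacer(chalk: List[int], k: int) -> int:
--     total = sum(chalk)
--     k = k%total
--     for i in range(len(chalk)):
--         if k<chalk[i]:
--             return i
--         k -= chalk[i]
--     return 0
-- ===== SOURCE B (Python) =====
-- from typing import List
--
--
-- def chalkReplacer(chalk: List[int], k: int) -> int:
--     k %= sum(chalk)
--
--     def search(seg, base, k):
--         # Divide and conquer: find the first position (offset by base) in seg whose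
--         # chalk need exceeds the remaining budget k; return (index or None, leftover k).
--         if len(seg) <= 1:
--             if not seg:
--                 return None, k
--             return (base, k) if k < seg[0] else (None, k - seg[0])
--         m = len(seg) // 2
--         res, k2 = search(seg[:m], base, k)
--         if res is not None:
--             return res, k2
--         return search(seg[m:], base + m, k2)
--
--     res, _ = search(chalk, 0, k)
--     return res if res is not None else 0
-- ===== Notes on version B (the rewrite author's own statement) =====
-- stated objective: alternative
-- what changed: B replaces A's single linear subtract-and-compare pass by a divide-and-conquer search: it splits the array in half, searches the left half recursively and, when the student is not there, carries the leftover budget into the right half (tree recursion on slices instead of an index loop); this stays correct even for negative chalk values, where binary search over prefix sums would not be.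
import Mathlib
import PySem

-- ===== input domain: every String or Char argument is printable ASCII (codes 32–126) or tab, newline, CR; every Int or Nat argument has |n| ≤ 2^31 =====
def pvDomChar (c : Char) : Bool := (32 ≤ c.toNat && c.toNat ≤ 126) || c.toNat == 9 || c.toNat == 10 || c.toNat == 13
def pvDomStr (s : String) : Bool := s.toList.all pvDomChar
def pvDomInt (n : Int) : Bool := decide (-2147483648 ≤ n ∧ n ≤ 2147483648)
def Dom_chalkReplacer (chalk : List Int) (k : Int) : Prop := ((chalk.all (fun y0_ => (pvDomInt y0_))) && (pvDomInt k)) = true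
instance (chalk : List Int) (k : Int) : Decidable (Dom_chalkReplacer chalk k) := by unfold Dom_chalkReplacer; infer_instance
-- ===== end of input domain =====

-- B replaces A's linear subtract-and-compare pass by a divide-and-conquer search over
-- halves of the array (alternative decomposition; not faster).


-- ===== PORT A =====
-- A's `for i in range(len(chalk))` reading chalk[i] in order: recursion over the list
-- carrying the running index i and the remaining k.
def chalkReplacerLoopA : List Int → Int → Int → Int
  | [], _, _ => 0
  | c :: rest, i, k => if k < c then i else chalkReplacerLoopA rest (i + 1) (k - c)

def chalkReplacer (chalk : List Int) (k : Int) : Int :=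
  let total := chalk.sum
  let k' := PySem.Int.mod k total
  chalkReplacerLoopA chalk 0 k'

-- ===== PORT B =====
-- B's `search(seg, base, k)`: divide and conquer on the segment; returns
-- (found index or None, leftover budget).
def chalkSearchB (seg : List Int) (base : Int) (k : Int) : Option Int × Int :=
  if seg.length ≤ 1 then
    match seg with
    | [] => (none, k)
    | c :: _ => if k < c then (some base, k) else (none, k - c)
  else
    let m := seg.length / 2
    match chalkSearchB (seg.take m) base k with
    | (some i, k2) => (some i, k2)
    | (none, k2) => chalkSearchB (seg.drop m) (base + (m : Int)) k2
termination_by seg.length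
decreasing_by
  · simp only [List.length_take]; omega
  · simp only [List.length_drop]; omega

def chalkReplacer_alt (chalk : List Int) (k : Int) : Int :=
  let k' := PySem.Int.mod k chalk.sum
  match chalkSearchB chalk 0 k' with
  | (some i, _) => i
  | (none, _) => 0

-- ===== PRECONDITION & SPEC =====
-- A raises ZeroDivisionError (k % total) exactly when sum(chalk) = 0 (including the
-- empty list); B raises there too. No input on which A returns is excluded.
def Pre_chalkReplacer (chalk : List Int) (k : Int) : Prop := chalk.sum ≠ 0
instance (chalk : List Int) (k : Int) : Decidable (Pre_chalkReplacer chalk k) := by unfold Pre_chalkReplacer; infer_instance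

def pvWitness_chalkReplacer : List Int × Int := ([5, 1, 5], 22)

def Spec_chalkReplacer (chalk : List Int) (k : Int) (out : Int) : Prop := out = chalkReplacer_alt chalk k
instance (chalk : List Int) (k : Int) (out : Int) : Decidable (Spec_chalkReplacer chalk k out) := by unfold Spec_chalkReplacer; infer_instance

-- ===== CLAIM (what is proved, stated in full; the proofs are below) =====
def Claim_equal_chalkReplacer : Prop := ∀ (chalk : List Int) (k : Int), Dom_chalkReplacer chalk k → Pre_chalkReplacer chalk k → Spec_chalkReplacer chalk k (chalkReplacer chalk k)

-- ===== LEMMAS AND PROOFS =====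

-- Linear reference scan: the pair (first index found, leftover budget).
def chalkLinScan : List Int → Int → Int → Option Int × Int
  | [], _, k => (none, k)
  | c :: rest, i, k => if k < c then (some i, k) else chalkLinScan rest (i + 1) (k - c)

lemma chalkLinScan_append (l1 l2 : List Int) (i k : Int) :
    chalkLinScan (l1 ++ l2) i k =
      match chalkLinScan l1 i k with
      | (some j, k2) => (some j, k2)
      | (none, k2) => chalkLinScan l2 (i + (l1.length : Int)) k2 := by
  induction l1 generalizing i k with
  | nil => simp [chalkLinScan]
  | cons c rest ih =>
    simp only [List.cons_append, chalkLinScan]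
    by_cases h : k < c
    · simp [h]
    · simp only [if_neg h, ih, List.length_cons]
      have : i + 1 + (rest.length : Int) = i + ((rest.length : Nat) + 1 : Nat) := by
        push_cast; ring
      rw [this]

-- The divide-and-conquer search computes the linear scan.
lemma chalkSearchB_eq_lin (seg : List Int) (base k : Int) :
    chalkSearchB seg base k = chalkLinScan seg base k := by
  induction hn : seg.length using Nat.strong_induction_on generalizing seg base k with
  | _ n ih =>
    rw [chalkSearchB.eq_def]
    by_cases h1 : seg.length ≤ 1
    · rw [if_pos h1]
      match seg with
      | [] => simp [chalkLinScan]
      | [c] => simp [chalkLinScan]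
      | c :: d :: t => simp at h1
    · rw [if_neg h1]
      simp only []
      show (match chalkSearchB (seg.take (seg.length / 2)) base k with
        | (some i, k2) => (some i, k2)
        | (none, k2) => chalkSearchB (seg.drop (seg.length / 2)) (base + ((seg.length / 2 : Nat) : Int)) k2) = chalkLinScan seg base k
      have hm1 : (seg.take (seg.length / 2)).length < n := by
        simp only [List.length_take]; omega
      have hm2 : (seg.drop (seg.length / 2)).length < n := by
        simp only [List.length_drop]; omega
      have hd : ∀ (b kk : Int), chalkSearchB (seg.drop (seg.length / 2)) b kk =
          chalkLinScan (seg.drop (seg.length / 2)) b kk := fun b kk => ih _ hm2 _ b kk rfl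
      rw [ih _ hm1 _ _ _ rfl]
      simp only [hd]
      have hlen : ((seg.take (seg.length / 2)).length : Int) = ((seg.length / 2 : Nat) : Int) := by
        simp only [List.length_take]; omega
      conv_rhs => rw [← List.take_append_drop (seg.length / 2) seg]
      rw [chalkLinScan_append, hlen]

-- A's loop is the first projection of the linear scan (defaulting to 0).
lemma chalkReplacerLoopA_eq (l : List Int) (i k : Int) :
    chalkReplacerLoopA l i k = ((chalkLinScan l i k).1).getD 0 := by
  induction l generalizing i k with
  | nil => simp [chalkReplacerLoopA, chalkLinScan]
  | cons c rest ih =>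
    simp only [chalkReplacerLoopA, chalkLinScan]
    by_cases h : k < c
    · simp [h]
    · simp [h, ih]

-- ===== VERDICT (by name: the statement is the Claim_ definition above) =====
theorem chalkReplacer_spec : Claim_equal_chalkReplacer := by
  intro chalk k _ _
  unfold Spec_chalkReplacer
  simp only [chalkReplacer, chalkReplacer_alt, chalkSearchB_eq_lin,
    chalkReplacerLoopA_eq]
  cases h : chalkLinScan chalk 0 (PySem.Int.mod k chalk.sum) with
  | mk fst snd => cases fst <;> simp
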